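-- pv_equiv track=rewrite | github.com/MDxIT/Mitogen_2019 | Mitogen/config/mitoJython/analysis/analysis_method.py | make_load_data_rows
-- ===== SOURCE A (Python) =====
-- def make_load_data_rows(data):
--     """Combines the load data fields
--
--         The data is a list of lists so we first find the max length of the sub lists which will be used to
--         make the correct number of rows. If a certain field has fewer results than the max, the fields first
--         result is appended to the row.
--     Args:
--         data: list of lists of load data fields
--     Returns:
--         rows: list of rows
--     """
--     rows = []
--     if data:
--         max_len = max([len(res) for res in data])
--
--         for i in range(0,max_len):
--             row = []
--             for field in data:
--                 try:
--                     row.append(field[i])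
--                 except IndexError:
--                     row.append(field[0])
--             rows.append(row)
--     return rows
-- ===== SOURCE B (Python) =====
-- def make_load_data_rows(data):
--     if not data:
--         return []
--     max_len = max(len(f) for f in data)
--     padded = [f + f[:1] * (max_len - len(f)) for f in data]
--     return [list(t) for t in zip(*padded)]
-- ===== Notes on version B (the rewrite author's own statement) =====
-- stated objective: idiomatic
-- what changed: B pads every field to the max length once (f + f[:1]*(max_len-len(f))) and builds the rows with a single zip(*padded) transpose, replacing A's per-row per-field try/except indexing loop.
-- outside the precondition, e.g. on make_load_data_rows([[1, 2], []]): A raises IndexError, B returns []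
import Mathlib
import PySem

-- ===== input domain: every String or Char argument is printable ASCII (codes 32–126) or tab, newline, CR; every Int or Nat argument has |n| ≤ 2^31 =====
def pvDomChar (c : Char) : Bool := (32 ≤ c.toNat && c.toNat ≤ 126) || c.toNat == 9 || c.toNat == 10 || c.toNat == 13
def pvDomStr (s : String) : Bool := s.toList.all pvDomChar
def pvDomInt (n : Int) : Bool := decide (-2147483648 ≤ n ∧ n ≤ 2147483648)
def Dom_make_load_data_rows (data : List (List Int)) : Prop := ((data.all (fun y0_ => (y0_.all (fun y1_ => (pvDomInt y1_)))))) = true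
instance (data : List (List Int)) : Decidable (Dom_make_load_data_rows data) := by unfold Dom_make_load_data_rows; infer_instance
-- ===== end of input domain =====

-- B pads each field column to the max length first and transposes once (idiomatic zip(*padded)),
-- instead of A's per-row per-field try/except indexing.


-- ===== PORT A =====
def make_load_data_rows (data : List (List Int)) : List (List Int) :=
  if data.isEmpty then []
  else
    let max_len : Int := (PySem.List.max? (data.map (fun res => (res.length : Int))) (fun x => x)).getD 0
    (PySem.List.pyRange 0 max_len 1).foldl
      (fun rows i =>
        rows ++ [data.foldl (fun row field =>
          row ++ [match PySem.List.pyGet? field i with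
                  | some v => v
                  | none => PySem.List.pyGetD field 0 0]) []])   -- 'except IndexError: row.append(field[0])'; field[0] on an empty field raises again (outside Pre_)
      []

-- ===== PORT B =====
def make_load_data_rows_alt (data : List (List Int)) : List (List Int) :=
  if data.isEmpty then []
  else
    let max_len : Int := (PySem.List.max? (data.map (fun f => (f.length : Int))) (fun x => x)).getD 0
    -- f + f[:1] * (max_len - len(f)) ; list repetition l * n ported as flatten of n copies
    let padded := data.map (fun f =>
      f ++ (List.replicate (max_len - (f.length : Int)).toNat (PySem.List.slice f none (some 1))).flatten)
    -- zip(*padded): truncates at the shortest list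
    let n : Nat := ((padded.map List.length).min?).getD 0
    (List.range n).map (fun i => padded.map (fun l => l.getD i 0))

-- ===== PRECONDITION & SPEC =====
-- Pre_ excludes inputs mixing empty and non-empty fields: there A raises IndexError
-- (the except-branch 'field[0]' raises again on an empty field), so A returns no value.
def Pre_make_load_data_rows (data : List (List Int)) : Prop :=
  (∀ f ∈ data, f ≠ []) ∨ (∀ f ∈ data, f = [])
instance (data : List (List Int)) : Decidable (Pre_make_load_data_rows data) := by unfold Pre_make_load_data_rows; infer_instance
def pvWitness_make_load_data_rows : List (List Int) := [[1, 2, 3], [4], [5, 6]]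

def Spec_make_load_data_rows (data : List (List Int)) (out : List (List Int)) : Prop := out = make_load_data_rows_alt data
instance (data : List (List Int)) (out : List (List Int)) : Decidable (Spec_make_load_data_rows data out) := by unfold Spec_make_load_data_rows; infer_instance

-- ===== CLAIM (what is proved, stated in full; the proofs are below) =====
def Claim_equal_make_load_data_rows : Prop := ∀ (data : List (List Int)), Dom_make_load_data_rows data → Pre_make_load_data_rows data → Spec_make_load_data_rows data (make_load_data_rows data)

-- ===== LEMMAS AND PROOFS =====


-- min? of a nonempty constant list (the lengths of B's padded columns are all equal)
lemma foldl_min_const {t : List Nat} {c : Nat} (h : ∀ x ∈ t, x = c) : t.foldl min c = c := by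
  induction t with
  | nil => rfl
  | cons a t ih =>
    have ha := h a (by simp)
    simp [ha, ih (fun x hx => h x (by simp [hx]))]

lemma min?_const {l : List Nat} {c : Nat} (hne : l ≠ []) (h : ∀ x ∈ l, x = c) :
    l.min? = some c := by
  cases l with
  | nil => exact absurd rfl hne
  | cons a t =>
    rw [List.min?_cons']
    have ha := h a (by simp)
    subst ha
    rw [foldl_min_const (fun x hx => h x (by simp [hx]))]

-- f[:1] on a non-empty list
lemma slice_one (f : List Int) (hf : f ≠ []) :
    PySem.List.slice f none (some 1) = [PySem.List.pyGetD f 0 0] := by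
  obtain ⟨hd, tl, rfl⟩ := List.exists_cons_of_ne_nil hf
  simp [pysem, PySem.List.pyGetD_zero_cons]

lemma pad_len (f : List Int) (hf : f ≠ []) (c : Nat) :
    ((List.replicate c (PySem.List.slice f none (some 1))).flatten).length = c := by
  rw [slice_one f hf, List.flatten_replicate_singleton, List.length_replicate]

-- the per-element agreement: A's try/except index equals B's padded-list index
lemma elem_eq (f : List Int) (k : Nat) (m : Int) (hf : f ≠ []) (hk : (k : Int) < m)
    (hlen : (f.length : Int) ≤ m) :
    (match PySem.List.pyGet? f ((k : Nat) : Int) with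
      | some v => v
      | none => PySem.List.pyGetD f 0 0)
    = (f ++ (List.replicate (m - (f.length : Int)).toNat (PySem.List.slice f none (some 1))).flatten).getD k 0 := by
  rw [slice_one f hf, List.flatten_replicate_singleton, PySem.List.pyGet?_natCast]
  by_cases hkl : k < f.length
  · rw [List.getElem?_eq_getElem hkl, List.getD_append _ _ 0 k hkl]
    simp [List.getD_eq_getElem?_getD, List.getElem?_eq_getElem hkl]
  · rw [List.getElem?_eq_none (by omega), List.getD_append_right _ _ 0 k (by omega),
      List.getD_replicate _ (by omega)]

-- A as a map over range
lemma portA_map (data : List (List Int)) (m : Int) :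
    (PySem.List.pyRange 0 m 1).foldl
      (fun rows i =>
        rows ++ [data.foldl (fun row field =>
          row ++ [match PySem.List.pyGet? field i with
                  | some v => v
                  | none => PySem.List.pyGetD field 0 0]) []])
      []
    = (List.range m.toNat).map (fun k => data.map (fun field =>
        match PySem.List.pyGet? field ((k : Nat) : Int) with
        | some v => v
        | none => PySem.List.pyGetD field 0 0)) := by
  simp only [PySem.List.foldl_append_singleton_eq_map, List.nil_append,
    PySem.List.foldl_append_singleton_eq_map]
  rw [PySem.List.pyRange_one]
  simp [List.map_map, Function.comp]

-- ===== VERDICT (by name: the statement is the Claim_ definition above) =====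

theorem make_load_data_rows_spec : Claim_equal_make_load_data_rows := by
  intro data _ hpre
  unfold Spec_make_load_data_rows make_load_data_rows make_load_data_rows_alt
  by_cases hd : data.isEmpty
  · simp [hd]
  · simp only [hd, if_neg, Bool.false_eq_true, not_false_iff]
    have hdn : data ≠ [] := by simpa [List.isEmpty_iff] using hd
    -- the shared max
    cases hmax : PySem.List.max? (data.map (fun res => (res.length : Int))) (fun x => x) with
    | none =>
      exact absurd (by simpa using (PySem.List.max?_eq_none_iff _ _).mp hmax) hdn
    | some m =>
      have hmem : m ∈ data.map (fun res => (res.length : Int)) := PySem.List.max?_mem hmax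
      have hub : ∀ y ∈ data.map (fun res => (res.length : Int)), y ≤ m := by
        intro y hy; simpa using PySem.List.max?_isMax hmax y hy
      obtain ⟨g, hg, hgm⟩ := List.mem_map.mp hmem
      have hm0 : 0 ≤ m := by omega
      simp only [Option.getD_some]
      rw [portA_map]
      rcases hpre with hne | hall
      · -- all fields non-empty: every padded column has length m.toNat
        have hlen : ∀ x ∈ (data.map (fun f =>
            f ++ (List.replicate (m - (f.length : Int)).toNat (PySem.List.slice f none (some 1))).flatten)).map List.length,
            x = m.toNat := by
          intro x hx
          rw [List.map_map] at hx
          obtain ⟨f, hf, rfl⟩ := List.mem_map.mp hx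
          have hfl : (f.length : Int) ≤ m := hub _ (List.mem_map_of_mem hf)
          simp only [Function.comp_apply]
          rw [List.length_append, pad_len f (hne f hf)]
          omega
        rw [min?_const (by simpa using hdn) hlen]
        simp only [Option.getD_some, List.map_map]
        apply List.map_congr_left
        intro k hk
        have hkm : (k : Int) < m := by
          have := List.mem_range.mp hk; omega
        apply List.map_congr_left
        intro f hf
        simp only [Function.comp_apply]
        exact elem_eq f k m (hne f hf) hkm (hub _ (List.mem_map_of_mem hf))
      · -- all fields empty: m = 0 and both sides are []
        have hm : m = 0 := by
          rw [hall g hg] at hgm; simpa using hgm.symm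
        subst hm
        have hlen0 : ∀ x ∈ (data.map (fun f =>
            f ++ (List.replicate ((0:Int) - (f.length : Int)).toNat (PySem.List.slice f none (some 1))).flatten)).map List.length,
            x = 0 := by
          intro x hx
          rw [List.map_map] at hx
          obtain ⟨f, hf, rfl⟩ := List.mem_map.mp hx
          have : f = [] := hall f hf
          subst this
          simp [pysem]
        rw [min?_const (by simpa using hdn) hlen0]
        simp
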